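-- pv_equiv track=rewrite | github.com/carlosan2025/juris-agi-monorepo | apps/juris_edge/python/juris_agi/wme/world_model.py | _find_consistent_features
-- ===== SOURCE A (Python) =====
-- from typing import List, Dict, Any, Optional
--
-- def _find_consistent_features(
--
--     all_features: List[Dict[str, Any]],
-- ) -> Dict[str, Any]:
--     """Find features that are consistent across all pairs."""
--     if not all_features:
--         return {}
--
--     consistent = {}
--     first = all_features[0]
--
--     for key, value in first.items():
--         if all(f.get(key) == value for f in all_features):
--             consistent[key] = value
--
--     return consistent
-- ===== SOURCE B (Python) =====
-- from typing import List, Dict, Any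
--
-- def _find_consistent_features(
--     all_features: List[Dict[str, Any]],
-- ) -> Dict[str, Any]:
--     """Find features that are consistent across all pairs (candidate-pruning version)."""
--     if not all_features:
--         return {}
--     consistent = dict(all_features[0])
--     for f in all_features[1:]:
--         for key, value in list(consistent.items()):
--             if f.get(key) != value:
--                 del consistent[key]
--     return consistent
-- ===== Notes on version B (the rewrite author's own statement) =====
-- stated objective: alternative
-- what changed: Instead of testing each key of the first dict against every dict, B maintains a shrinking candidate dict initialized to the first dict and, for each later dict, deletes the candidates it contradicts (pruning mutable state, one pass over the dicts).
import Mathlib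
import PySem

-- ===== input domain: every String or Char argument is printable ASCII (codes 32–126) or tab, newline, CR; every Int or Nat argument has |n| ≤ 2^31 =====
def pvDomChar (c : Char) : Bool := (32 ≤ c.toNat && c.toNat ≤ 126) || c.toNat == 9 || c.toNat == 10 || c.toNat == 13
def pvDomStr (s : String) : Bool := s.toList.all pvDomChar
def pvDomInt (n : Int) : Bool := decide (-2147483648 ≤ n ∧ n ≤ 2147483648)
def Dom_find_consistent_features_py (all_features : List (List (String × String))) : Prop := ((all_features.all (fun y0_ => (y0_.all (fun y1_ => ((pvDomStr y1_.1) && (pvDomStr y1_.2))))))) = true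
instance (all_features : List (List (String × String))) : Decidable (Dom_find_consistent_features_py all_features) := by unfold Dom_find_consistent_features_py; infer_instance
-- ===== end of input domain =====

-- B replaces A's per-key scan of all dicts by candidate pruning: start from the first dict
-- and delete keys that each later dict contradicts (objective: alternative decomposition, same cost).

-- ===== PORT A =====
-- d.get(k) on a Python dict: first (unique) matching key, none if missing (exact)
def dget? : List (String × String) → String → Option String
  | [], _ => none
  | p :: rest, key => if p.1 = key then some p.2 else dget? rest key

-- d[k] = v on a Python dict: overwrite in place, a new key appends (exact)
def dinsert (d : List (String × String)) (k v : String) : List (String × String) :=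
  if d.any (fun p => p.1 == k) then d.map (fun p => if p.1 = k then (k, v) else p)
  else d ++ [(k, v)]

def find_consistent_features_py (all_features : List (List (String × String))) : List (String × String) :=
  match all_features with
  | [] => []
  | first :: _ =>
    first.foldl (fun consistent kv =>
      if all_features.all (fun f => dget? f kv.1 == some kv.2) then
        dinsert consistent kv.1 kv.2
      else consistent) []

-- ===== PORT B =====
-- del d[key] on a Python dict: remove the (unique) pair with that key (exact for a present key)
def derase : List (String × String) → String → List (String × String)
  | [], _ => []
  | p :: rest, key => if p.1 = key then rest else p :: derase rest key

def find_consistent_features_py_alt (all_features : List (List (String × String))) : List (String × String) :=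
  match all_features with
  | [] => []
  | first :: rest =>
    rest.foldl (fun consistent f =>
      consistent.foldl (fun c kv =>
        if !(dget? f kv.1 == some kv.2) then derase c kv.1 else c) consistent) first

-- ===== PRECONDITION & SPEC =====
-- Pre_ only requires each inner association list to have distinct keys, which every Python dict
-- guarantees by construction; it excludes no input the Python A actually accepts.
def Pre_find_consistent_features_py (all_features : List (List (String × String))) : Prop :=
  ∀ f ∈ all_features, (f.map Prod.fst).Nodup

instance (all_features : List (List (String × String))) : Decidable (Pre_find_consistent_features_py all_features) := by
  unfold Pre_find_consistent_features_py; infer_instance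

def pvWitness_find_consistent_features_py : (List (List (String × String))) :=
  [[("a", "x")], [("a", "x"), ("b", "y")]]

def Spec_find_consistent_features_py (all_features : List (List (String × String))) (out : List (String × String)) : Prop := out = find_consistent_features_py_alt all_features
instance (all_features : List (List (String × String))) (out : List (String × String)) : Decidable (Spec_find_consistent_features_py all_features out) := by unfold Spec_find_consistent_features_py; infer_instance

-- ===== CLAIM (what is proved, stated in full; the proofs are below) =====
def Claim_equal_find_consistent_features_py : Prop := ∀ (all_features : List (List (String × String))), Dom_find_consistent_features_py all_features → Pre_find_consistent_features_py all_features → Spec_find_consistent_features_py all_features (find_consistent_features_py all_features)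

-- ===== LEMMAS AND PROOFS =====

theorem dget?_of_mem {l : List (String × String)} {kv : String × String}
    (hnd : (l.map Prod.fst).Nodup) (hm : kv ∈ l) : dget? l kv.1 = some kv.2 := by
  induction l with
  | nil => cases hm
  | cons p rest ih =>
    simp only [List.map_cons, List.nodup_cons] at hnd
    rcases List.mem_cons.1 hm with h | h
    · subst h; simp [dget?]
    · have hne : p.1 ≠ kv.1 := by
        intro he
        exact hnd.1 (he ▸ List.mem_map.2 ⟨kv, h, rfl⟩)
      simp [dget?, hne, ih hnd.2 h]

theorem dinsert_fresh {d : List (String × String)} {k : String}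
    (h : k ∉ d.map Prod.fst) (v : String) : dinsert d k v = d ++ [(k, v)] := by
  have : d.any (fun p => p.1 == k) = false := by
    simp only [List.any_eq_false]
    intro p hp
    simp only [beq_iff_eq]
    intro he
    exact h (he ▸ List.mem_map.2 ⟨p, hp, rfl⟩)
  simp [dinsert, this]

theorem derase_append {l r : List (String × String)} {k : String}
    (h : k ∉ l.map Prod.fst) : derase (l ++ r) k = l ++ derase r k := by
  induction l with
  | nil => simp
  | cons p rest ih =>
    simp only [List.map_cons, List.mem_cons] at h
    push Not at h
    simp [derase, h.1.symm, ih h.2]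

-- A's loop over first with fresh-key inserts appends exactly the filtered pairs
theorem foldl_dinsert_filter (P : String × String → Bool) :
    ∀ (l acc : List (String × String)),
      ((acc.map Prod.fst) ++ (l.map Prod.fst)).Nodup →
      l.foldl (fun c kv => if P kv then dinsert c kv.1 kv.2 else c) acc = acc ++ l.filter P := by
  intro l
  induction l with
  | nil => intro acc _; simp
  | cons kv rest ih =>
    intro acc hnd
    have hfresh : kv.1 ∉ acc.map Prod.fst := by
      have hdisj := List.disjoint_of_nodup_append hnd
      intro hm
      exact hdisj hm (by simp)
    by_cases hP : P kv = true
    · have hstep : (if P kv then dinsert acc kv.1 kv.2 else acc) = acc ++ [kv] := by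
        simp [hP, dinsert_fresh hfresh]
      rw [List.foldl_cons, hstep, ih (acc ++ [kv]) (by simpa using hnd)]
      simp [hP]
    · have hP' : P kv = false := by simpa using hP
      rw [List.foldl_cons]
      simp only [hP', Bool.false_eq_true, if_false]
      rw [ih acc (by
        have : ((acc.map Prod.fst) ++ (kv.1 :: rest.map Prod.fst)).Nodup := by simpa using hnd
        have h2 := this.sublist (List.Sublist.append_left (List.sublist_cons_self _ _) _)
        simpa using h2)]
      simp [hP']

-- B's inner loop (snapshot iteration + delete) filters by the current dict
theorem inner_loop_filter (q : String × String → Bool) :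
    ∀ (s t : List (String × String)),
      ((t.map Prod.fst) ++ (s.map Prod.fst)).Nodup →
      s.foldl (fun c kv => if !(q kv) then derase c kv.1 else c) (t.filter q ++ s)
        = (t ++ s).filter q := by
  intro s
  induction s with
  | nil => intro t _; simp
  | cons kv s' ih =>
    intro t hnd
    have hfresh : kv.1 ∉ (t.filter q).map Prod.fst := by
      have hdisj := List.disjoint_of_nodup_append hnd
      intro hm
      rcases List.mem_map.1 hm with ⟨p, hp, hpe⟩
      exact hdisj (List.mem_map.2 ⟨p, List.mem_of_mem_filter hp, hpe⟩) (by simp)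
    have hnd' : (((t ++ [kv]).map Prod.fst) ++ (s'.map Prod.fst)).Nodup := by
      simpa using hnd
    by_cases hq : q kv = true
    · rw [List.foldl_cons]
      have hstep : (if !(q kv) then derase (t.filter q ++ kv :: s') kv.1 else (t.filter q ++ kv :: s'))
          = (t ++ [kv]).filter q ++ s' := by
        simp [hq]
      rw [hstep, ih (t ++ [kv]) hnd']
      simp
    · have hq' : q kv = false := by simpa using hq
      rw [List.foldl_cons]
      have hstep : (if !(q kv) then derase (t.filter q ++ kv :: s') kv.1 else (t.filter q ++ kv :: s'))
          = (t ++ [kv]).filter q ++ s' := by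
        simp only [hq', Bool.not_false]
        rw [derase_append hfresh]
        simp [derase, hq']
      rw [hstep, ih (t ++ [kv]) hnd']
      simp

theorem inner_loop_eq (q : String × String → Bool) (c : List (String × String))
    (h : (c.map Prod.fst).Nodup) :
    c.foldl (fun c' kv => if !(q kv) then derase c' kv.1 else c') c = c.filter q := by
  have := inner_loop_filter q c [] (by simpa using h)
  simpa using this

theorem nodup_keys_filter {c : List (String × String)} (p : String × String → Bool)
    (h : (c.map Prod.fst).Nodup) : ((c.filter p).map Prod.fst).Nodup :=
  h.sublist ((c.filter_sublist (p := p)).map Prod.fst)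

-- B's outer loop = filtering the first dict by agreement with every later dict
theorem outer_loop_eq :
    ∀ (rest : List (List (String × String))) (first : List (String × String)),
      (first.map Prod.fst).Nodup →
      rest.foldl (fun consistent f =>
          consistent.foldl (fun c kv => if !(dget? f kv.1 == some kv.2) then derase c kv.1 else c) consistent) first
        = first.filter (fun kv => rest.all (fun f => dget? f kv.1 == some kv.2)) := by
  intro rest
  induction rest with
  | nil => intro first _; simp
  | cons f rest' ih =>
    intro first hnd
    rw [List.foldl_cons, inner_loop_eq _ _ hnd,
      ih _ (nodup_keys_filter _ hnd), List.filter_filter]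
    simp [Bool.and_comm]

-- ===== VERDICT (by name: the statement is the Claim_ definition above) =====
theorem find_consistent_features_py_spec : Claim_equal_find_consistent_features_py := by
  intro all_features _ hpre
  unfold Spec_find_consistent_features_py
  cases all_features with
  | nil => rfl
  | cons first rest =>
    have hnd : (first.map Prod.fst).Nodup := hpre first (by simp)
    have hA : find_consistent_features_py (first :: rest)
        = first.foldl (fun consistent kv =>
            if (first :: rest).all (fun f => dget? f kv.1 == some kv.2) then
              dinsert consistent kv.1 kv.2 else consistent) [] := rfl
    have hB : find_consistent_features_py_alt (first :: rest)
        = rest.foldl (fun consistent f =>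
            consistent.foldl (fun c kv =>
              if !(dget? f kv.1 == some kv.2) then derase c kv.1 else c) consistent) first := rfl
    rw [hA, hB, foldl_dinsert_filter _ first [] (by simpa using hnd), outer_loop_eq rest first hnd]
    simp only [List.nil_append]
    apply List.filter_congr
    intro kv hkv
    simp only [List.all_cons, dget?_of_mem hnd hkv, beq_self_eq_true, Bool.true_and]
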